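-- pv_equiv track=rewrite | github.com/vivek42537/ECE-404 | HW3/mult_inv.py | russianPeasant
-- ===== SOURCE A (Python) =====
-- def russianPeasant(a, b):
--     ans = 0
--     if (b < 0) :
--         b = -b
--         a = -a
--     while (b > 0):
--         if (b & 1): #if b is odd
--             ans = ans + a
--
--         a = a << 1
--         b = b >> 1
--
--     return ans
-- ===== SOURCE B (Python) =====
-- def russianPeasant(a, b):
--     return a * b
-- ===== Notes on version B (the rewrite author's own statement) =====
-- stated objective: simpler
-- what changed: Replaced the Russian-peasant shift-and-add loop with the closed form a * b.
import Mathlib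
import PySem

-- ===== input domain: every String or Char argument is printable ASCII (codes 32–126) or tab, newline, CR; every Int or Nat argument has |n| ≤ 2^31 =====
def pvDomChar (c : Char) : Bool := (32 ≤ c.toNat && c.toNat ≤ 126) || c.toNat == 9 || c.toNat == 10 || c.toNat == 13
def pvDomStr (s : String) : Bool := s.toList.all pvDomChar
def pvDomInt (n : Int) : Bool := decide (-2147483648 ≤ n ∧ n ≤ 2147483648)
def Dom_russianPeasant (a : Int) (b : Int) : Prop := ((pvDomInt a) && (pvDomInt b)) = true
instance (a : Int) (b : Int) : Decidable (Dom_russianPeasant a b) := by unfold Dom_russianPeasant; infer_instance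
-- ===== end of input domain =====

-- B replaces the Russian-peasant shift-and-add loop with the closed form a * b (simpler).
-- ===== PORT A =====
-- while-loop of A as structural recursion on b (entered only with b > 0);
-- 'b & 1' and 'b >> 1' for b > 0 are b mod 2 and floor-division by 2 (exact here).
def russianPeasantLoop (ans a b : Int) : Int :=
  if h : b > 0 then
    let ans := if PySem.Int.mod b 2 == 1 then ans + a else ans
    russianPeasantLoop ans (a * 2) (PySem.Int.floordiv b 2)
  else ans
termination_by b.toNat
decreasing_by
  rw [PySem.Int.floordiv_eq_ediv_of_pos (by omega)]
  omega

def russianPeasant (a : Int) (b : Int) : Int :=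
  if b < 0 then russianPeasantLoop 0 (-a) (-b)
  else russianPeasantLoop 0 a b

-- ===== PORT B =====
def russianPeasant_alt (a : Int) (b : Int) : Int := a * b

-- ===== PRECONDITION & SPEC =====
def Spec_russianPeasant (a : Int) (b : Int) (out : Int) : Prop := out = russianPeasant_alt a b
instance (a : Int) (b : Int) (out : Int) : Decidable (Spec_russianPeasant a b out) := by unfold Spec_russianPeasant; infer_instance

-- ===== CLAIM (what is proved, stated in full; the proofs are below) =====
def Claim_equal_russianPeasant : Prop := ∀ (a : Int) (b : Int), Dom_russianPeasant a b → Spec_russianPeasant a b (russianPeasant a b)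

-- ===== LEMMAS AND PROOFS =====

-- ===== VERDICT (by name: the statement is the Claim_ definition above) =====
theorem russianPeasantLoop_eq (n : Nat) (b : Int) (hb : 0 ≤ b) (hn : b.toNat = n) :
    ∀ ans a, russianPeasantLoop ans a b = ans + a * b := by
  induction n using Nat.strong_induction_on generalizing b with
  | _ n ih =>
    intro ans a
    rw [russianPeasantLoop]
    by_cases h : b > 0
    · have hfd : PySem.Int.floordiv b 2 = b / 2 := PySem.Int.floordiv_eq_ediv_of_pos (by omega)
      have hmd : PySem.Int.mod b 2 = b % 2 := PySem.Int.mod_eq_emod_of_pos (by omega)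
      simp only [h, dif_pos, hfd, hmd]
      rw [ih (b / 2).toNat (by omega) (b / 2) (by omega) rfl]
      have hb2 : b = 2 * (b / 2) + b % 2 := by omega
      by_cases ho : b % 2 = 1
      · simp only [ho, beq_self_eq_true, if_true]
        nth_rewrite 2 [hb2]; rw [ho]; ring
      · have h0 : b % 2 = 0 := by omega
        simp only [h0]
        nth_rewrite 2 [hb2]; rw [h0]
        norm_num; ring
    · simp [h]; omega

theorem russianPeasant_spec : Claim_equal_russianPeasant := by
  intro a b _
  unfold Spec_russianPeasant russianPeasant russianPeasant_alt
  by_cases h : b < 0 <;> simp [h]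
  · rw [russianPeasantLoop_eq (-b).toNat (-b) (by omega) rfl]; ring
  · rw [russianPeasantLoop_eq b.toNat b (by omega) rfl]; ring
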